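-- pv_equiv track=rewrite | github.com/troniixx/uzh | Computational Linguistics/Bachelor/Sem 1/Programming Techniques of CL/Exam Prep/Practice Exercise Sheet/Exercise 11/debug_me.py | text_analysis
-- ===== SOURCE A (Python) =====
-- def text_analysis(text):
--     word_count = 0
--     longest_word = ""
--
--     for word in text.split():
--         if len(word) > len(longest_word):
--             longest_word = word
--
--         word_count += 1
--
--     return word_count, longest_word
-- ===== SOURCE B (Python) =====
-- def text_analysis(text):
--     count = 0
--     cur = []
--     best = []
--     for ch in text:
--         if ch.isspace():
--             if cur:
--                 count += 1
--                 if len(cur) > len(best):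
--                     best = cur
--                 cur = []
--         else:
--             cur.append(ch)
--     if cur:
--         count += 1
--         if len(cur) > len(best):
--             best = cur
--     return count, "".join(best)
-- ===== Notes on version B (the rewrite author's own statement) =====
-- stated objective: alternative
-- what changed: Replaces A's split()-then-loop-over-words with a single character-level state machine that never materializes the word list: it accumulates the current run of non-space characters and finalizes count/longest at each word boundary.
import Mathlib
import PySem

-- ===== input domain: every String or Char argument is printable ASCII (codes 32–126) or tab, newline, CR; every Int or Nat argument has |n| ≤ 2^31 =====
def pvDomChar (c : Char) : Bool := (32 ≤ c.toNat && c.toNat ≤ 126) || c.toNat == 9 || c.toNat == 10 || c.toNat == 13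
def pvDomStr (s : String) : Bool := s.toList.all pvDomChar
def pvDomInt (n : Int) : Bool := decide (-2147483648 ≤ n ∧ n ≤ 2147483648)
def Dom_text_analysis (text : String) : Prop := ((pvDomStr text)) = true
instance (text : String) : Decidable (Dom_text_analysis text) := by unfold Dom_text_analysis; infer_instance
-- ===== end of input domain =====

-- B replaces A's split()-then-loop-over-words by a single character-level state
-- machine that never builds the word list (objective: alternative algorithm, same cost).


-- ===== PORT A =====
def text_analysis (text : String) : Int × String :=
  ((PySem.Str.split₀ text).foldl
    (fun st w =>
      let longest := if PySem.Str.len w > PySem.Str.len st.2 then w else st.2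
      (st.1 + 1, longest))
    ((0 : Int), ""))

-- ===== PORT B =====
-- one step of the character-level state machine: state = (count, cur, best)
def taStep (st : Int × List Char × List Char) (ch : Char) : Int × List Char × List Char :=
  if PySem.Chars.isspace ch then
    if st.2.1.isEmpty then st
    else (st.1 + 1, [], if st.2.1.length > st.2.2.length then st.2.1 else st.2.2)
  else (st.1, st.2.1 ++ [ch], st.2.2)

-- final flush of a pending word (the 'if cur:' block after the loop)
def taFlush (st : Int × List Char × List Char) : Int × List Char :=
  if st.2.1.isEmpty then (st.1, st.2.2)
  else (st.1 + 1, if st.2.1.length > st.2.2.length then st.2.1 else st.2.2)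

def text_analysis_alt (text : String) : Int × String :=
  let fin := taFlush (text.toList.foldl taStep ((0 : Int), [], []))
  (fin.1, String.ofList fin.2)

-- ===== PRECONDITION & SPEC =====
def Spec_text_analysis (text : String) (out : Int × String) : Prop := out = text_analysis_alt text
instance (text : String) (out : Int × String) : Decidable (Spec_text_analysis text out) := by unfold Spec_text_analysis; infer_instance

-- ===== CLAIM (what is proved, stated in full; the proofs are below) =====
def Claim_equal_text_analysis : Prop := ∀ (text : String), Dom_text_analysis text → Spec_text_analysis text (text_analysis text)

-- ===== LEMMAS AND PROOFS =====

-- A's word-level step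
def aStep (st : Int × String) (w : String) : Int × String :=
  let longest := if PySem.Str.len w > PySem.Str.len st.2 then w else st.2
  (st.1 + 1, longest)

lemma text_analysis_eq_aStep (text : String) :
    text_analysis text = (PySem.Str.split₀ text).foldl aStep ((0 : Int), "") := rfl

-- go's accumulator is a prefix: go s cur acc = acc.reverse ++ go s cur []
lemma go_acc (s : List Char) : ∀ (cur : List Char) (acc : List (List Char)),
    PySem.Chars.split₀.go s cur acc = acc.reverse ++ PySem.Chars.split₀.go s cur [] := by
  induction s with
  | nil =>
    intro cur acc
    simp only [PySem.Chars.split₀.go]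
    split <;> simp
  | cons c rest ih =>
    intro cur acc
    simp only [PySem.Chars.split₀.go]
    split
    · split
      · exact ih _ _
      · rw [ih [] (cur.reverse :: acc), ih [] [cur.reverse]]
        simp
    · exact ih _ _

lemma len_ofList (l : List Char) : PySem.Str.len (String.ofList l) = (l.length : Int) := by
  simp [PySem.Str.len]

-- the character fold (seeded with any state) equals A's word fold over go's words
lemma fold_eq (s : List Char) : ∀ (c : Int) (cur best : List Char),
    (let fin := taFlush (s.foldl taStep (c, cur, best)); ((fin.1, String.ofList fin.2) : Int × String))
      = (List.map String.ofList (PySem.Chars.split₀.go s cur.reverse [])).foldl aStep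
          (c, String.ofList best) := by
  induction s with
  | nil =>
    intro c cur best
    simp only [List.foldl_nil, PySem.Chars.split₀.go, List.isEmpty_reverse, List.reverse_reverse]
    by_cases h : cur.isEmpty
    · simp [taFlush, h]
    · rw [if_neg h]
      simp only [List.reverse_cons, List.reverse_nil, List.nil_append, List.map_cons,
        List.map_nil, List.foldl_cons, List.foldl_nil, taFlush, aStep, len_ofList]
      simp only [if_neg h]
      split_ifs with h1 h2 h2
      · rfl
      · omega
      · omega
      · rfl
  | cons ch rest ih =>
    intro c cur best
    simp only [List.foldl_cons, PySem.Chars.split₀.go]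
    by_cases hsp : PySem.Chars.isspace ch
    · simp only [hsp, if_pos, List.isEmpty_reverse]
      by_cases hcur : cur.isEmpty
      · have hnil : cur = [] := List.isEmpty_iff.mp hcur
        simp only [hcur, if_pos, taStep, hsp, if_pos]
        simpa [hnil] using ih c cur best
      · simp only [hcur, Bool.false_eq_true, if_neg, not_false_iff]
        rw [List.reverse_reverse, go_acc rest [] [cur]]
        simp only [List.reverse_cons, List.reverse_nil, List.nil_append, List.map_append,
          List.map_cons, List.map_nil, List.foldl_append, List.foldl_cons,
          List.foldl_nil]
        have hstep : taStep (c, cur, best) ch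
            = (c + 1, [], if cur.length > best.length then cur else best) := by
          simp [taStep, hsp, hcur]
        rw [hstep]
        have := ih (c + 1) [] (if cur.length > best.length then cur else best)
        simp only [List.reverse_nil] at this
        rw [this]
        congr 1
        simp only [aStep, len_ofList]
        split_ifs with h1 h2 h2
        · rfl
        · omega
        · omega
        · rfl
    · simp only [hsp, Bool.false_eq_true, if_neg, not_false_iff]
      have hstep : taStep (c, cur, best) ch = (c, cur ++ [ch], best) := by
        simp [taStep, hsp]
      rw [hstep]
      have := ih c (cur ++ [ch]) best
      simpa using this

theorem main_eq (text : String) : text_analysis text = text_analysis_alt text := by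
  rw [text_analysis_eq_aStep]
  unfold text_analysis_alt
  have := fold_eq text.toList 0 [] []
  simp only [List.reverse_nil] at this
  rw [this]
  rfl

-- ===== VERDICT (by name: the statement is the Claim_ definition above) =====
theorem text_analysis_spec : Claim_equal_text_analysis := by
  intro text _
  unfold Spec_text_analysis
  exact main_eq text
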